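-- pv_equiv track=rewrite | github.com/tos-kamiya/zombie-escape | src/zombie_escape/render/world_tiles.py | _encode_stage_barcode_pattern
-- ===== SOURCE A (Python) =====
-- def _encode_stage_barcode_pattern(stage_number: int) -> str:
--     value = max(0, int(stage_number))
--     bits = bin(value)[2:]
--     parity_bit = "0" if (bits.count("1") % 2 == 0) else "1"
--     start = "**_"
--     end = "_**"
--     encoded_bits = "".join("_*" if bit == "0" else "*_" for bit in bits)
--     encoded_parity = "_*" if parity_bit == "0" else "*_"
--     return start + encoded_bits + encoded_parity + end
-- ===== SOURCE B (Python) =====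
-- def _encode_stage_barcode_pattern(stage_number: int) -> str:
--     v = max(0, int(stage_number))
--     cells = []
--     parity = 0
--     while v:
--         b = v & 1
--         parity ^= b
--         cells.append("*_" if b else "_*")
--         v >>= 1
--     if not cells:
--         cells.append("_*")
--     cells.reverse()
--     cells.append("*_" if parity else "_*")
--     return "**_" + "".join(cells) + "_**"
-- ===== Notes on version B (the rewrite author's own statement) =====
-- stated objective: alternative
-- what changed: Replaces the bin()-string pipeline (format to text, count '1's, re-scan to map digits) with direct arithmetic bit extraction: a single LSB-first loop (v & 1, v >>= 1) that emits cells and XOR-accumulates the parity, then reverses, so no intermediate digit string and no counting pass.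
import Mathlib
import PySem

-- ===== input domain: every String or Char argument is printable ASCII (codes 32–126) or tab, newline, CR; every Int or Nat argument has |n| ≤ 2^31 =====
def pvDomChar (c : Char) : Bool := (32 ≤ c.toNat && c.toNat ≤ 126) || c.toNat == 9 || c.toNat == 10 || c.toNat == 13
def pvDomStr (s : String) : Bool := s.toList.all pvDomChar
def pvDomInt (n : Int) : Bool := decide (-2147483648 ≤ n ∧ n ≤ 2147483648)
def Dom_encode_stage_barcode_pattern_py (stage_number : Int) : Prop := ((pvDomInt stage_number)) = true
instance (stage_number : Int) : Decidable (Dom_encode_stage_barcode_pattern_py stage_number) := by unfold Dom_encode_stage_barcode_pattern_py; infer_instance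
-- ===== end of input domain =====

-- B replaces A's bin()-string pipeline with arithmetic LSB-first bit extraction and a running XOR parity (alternative decomposition, same cost).


-- ===== PORT A =====
-- the per-digit cell of the generator expression '"_*" if bit == "0" else "*_"'
def pvCell (bit : Char) : List Char := if bit = '0' then ['_', '*'] else ['*', '_']

def encode_stage_barcode_pattern_py (stage_number : Int) : String :=
  let value : Int := max 0 stage_number
  let bits : List Char := PySem.List.slice (PySem.Int.toBinChars0b value) (some 2) none  -- bin(value)[2:]
  let parity_bit : Char := if bits.count '1' % 2 = 0 then '0' else '1'
  let start : List Char := ['*', '*', '_']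
  let stop : List Char := ['_', '*', '*']
  let encoded_bits : List Char := bits.flatMap pvCell  -- "".join(… for bit in bits)
  let encoded_parity : List Char := if parity_bit = '0' then ['_', '*'] else ['*', '_']
  String.ofList (start ++ encoded_bits ++ encoded_parity ++ stop)

-- ===== PORT B =====
-- the 'while v:' loop of Source B: appends LSB-first cells, XORs parity, halves v
def pvBLoop (v : Nat) (cells : List (List Char)) (parity : Nat) : List (List Char) × Nat :=
  if h : v = 0 then (cells, parity)
  else pvBLoop (v / 2) (cells ++ [if v % 2 = 1 then ['*', '_'] else ['_', '*']]) (parity ^^^ v % 2)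
  decreasing_by exact Nat.div_lt_self (Nat.pos_of_ne_zero h) (by omega)

def encode_stage_barcode_pattern_py_alt (stage_number : Int) : String :=
  let v : Nat := (max 0 stage_number).toNat
  let r := pvBLoop v [] 0
  let cells0 := if r.1 = [] then [['_', '*']] else r.1
  let cells := cells0.reverse ++ [if r.2 = 1 then ['*', '_'] else ['_', '*']]
  String.ofList (['*', '*', '_'] ++ cells.flatten ++ ['_', '*', '*'])

-- ===== PRECONDITION & SPEC =====
def Spec_encode_stage_barcode_pattern_py (stage_number : Int) (out : String) : Prop := out = encode_stage_barcode_pattern_py_alt stage_number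
instance (stage_number : Int) (out : String) : Decidable (Spec_encode_stage_barcode_pattern_py stage_number out) := by unfold Spec_encode_stage_barcode_pattern_py; infer_instance

-- ===== CLAIM (what is proved, stated in full; the proofs are below) =====
def Claim_equal_encode_stage_barcode_pattern_py : Prop := ∀ (stage_number : Int), Dom_encode_stage_barcode_pattern_py stage_number → Spec_encode_stage_barcode_pattern_py stage_number (encode_stage_barcode_pattern_py stage_number)

-- ===== LEMMAS AND PROOFS =====

-- MSB-first binary digit characters (spec for Nat.toDigits 2)
def pvBdig (n : Nat) : List Char :=
  if _h : n < 2 then [Nat.digitChar n]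
  else pvBdig (n / 2) ++ [Nat.digitChar (n % 2)]
  decreasing_by exact Nat.div_lt_self (by omega) (by omega)

-- LSB-first cells as pvBLoop produces them
def pvLsb (n : Nat) : List (List Char) :=
  if h : n = 0 then []
  else (if n % 2 = 1 then ['*', '_'] else ['_', '*']) :: pvLsb (n / 2)
  decreasing_by exact Nat.div_lt_self (Nat.pos_of_ne_zero h) (by omega)

def pvPar (n : Nat) : Nat :=
  if h : n = 0 then 0 else (n % 2) ^^^ pvPar (n / 2)
  decreasing_by exact Nat.div_lt_self (Nat.pos_of_ne_zero h) (by omega)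

lemma pvBdig_lt_two (n : Nat) (h : n < 2) : pvBdig n = [Nat.digitChar n] := by
  conv_lhs => rw [pvBdig]
  rw [dif_pos h]

lemma pvBdig_ge_two (n : Nat) (h : ¬ n < 2) : pvBdig n = pvBdig (n / 2) ++ [Nat.digitChar (n % 2)] := by
  conv_lhs => rw [pvBdig]
  rw [dif_neg h]

lemma pvLsb_zero : pvLsb 0 = [] := by rw [pvLsb]; simp

lemma pvLsb_pos (n : Nat) (h : n ≠ 0) :
    pvLsb n = (if n % 2 = 1 then ['*', '_'] else ['_', '*']) :: pvLsb (n / 2) := by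
  conv_lhs => rw [pvLsb]
  rw [dif_neg h]

lemma pvPar_zero : pvPar 0 = 0 := by rw [pvPar]; simp

lemma pvPar_pos (n : Nat) (h : n ≠ 0) : pvPar n = (n % 2) ^^^ pvPar (n / 2) := by
  conv_lhs => rw [pvPar]
  rw [dif_neg h]

lemma pvToDigitsCore_eq (f : Nat) : ∀ n ds, n < f → Nat.toDigitsCore 2 f n ds = pvBdig n ++ ds := by
  induction f with
  | zero => intro n ds h; omega
  | succ f ih =>
    intro n ds h
    rw [Nat.toDigitsCore]
    by_cases h2 : n / 2 = 0
    · rw [if_pos h2, pvBdig_lt_two n (by omega)]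
      have : n % 2 = n := Nat.mod_eq_of_lt (by omega)
      simp [this]
    · rw [if_neg h2, ih (n / 2) _ (by omega), pvBdig_ge_two n (by omega)]
      simp

lemma pvToDigits_two (n : Nat) : Nat.toDigits 2 n = pvBdig n := by
  have := pvToDigitsCore_eq (n + 1) n [] (by omega)
  simpa [Nat.toDigits] using this

lemma pvBLoop_eq (v : Nat) : ∀ cells parity, pvBLoop v cells parity = (cells ++ pvLsb v, parity ^^^ pvPar v) := by
  induction v using Nat.strong_induction_on with
  | _ v ih =>
    intro cells parity
    by_cases h : v = 0
    · subst h; rw [pvBLoop, pvLsb_zero, pvPar_zero]; simp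
    · rw [pvBLoop, dif_neg h, ih (v / 2) (Nat.div_lt_self (Nat.pos_of_ne_zero h) (by omega)),
        pvLsb_pos v h, pvPar_pos v h]
      refine Prod.ext ?_ ?_
      · simp
      · exact Nat.xor_assoc parity (v % 2) (pvPar (v / 2))

lemma pvPar_le_one (n : Nat) : pvPar n ≤ 1 := by
  induction n using Nat.strong_induction_on with
  | _ n ih =>
    by_cases h : n = 0
    · rw [h, pvPar_zero]; omega
    · rw [pvPar_pos n h]
      have hA := ih (n / 2) (Nat.div_lt_self (Nat.pos_of_ne_zero h) (by omega))
      have hB := Nat.mod_two_eq_zero_or_one n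
      have hA' : pvPar (n / 2) = 0 ∨ pvPar (n / 2) = 1 := by omega
      rcases hB with hB | hB <;> rcases hA' with hA' | hA' <;> rw [hB, hA'] <;> decide

lemma pvXorMod (a b : Nat) : a % 2 ^^^ b % 2 = (a + b) % 2 := by
  rcases Nat.mod_two_eq_zero_or_one a with ha | ha <;> rcases Nat.mod_two_eq_zero_or_one b with hb | hb <;>
    rw [ha, hb] <;> simp <;> omega

-- bridge: for positive n the two digit decompositions agree cell-by-cell and in parity
lemma pvBridge (n : Nat) (hn : 0 < n) :
    (pvLsb n).reverse.flatten = (pvBdig n).flatMap pvCell ∧ pvPar n = (pvBdig n).count '1' % 2 := by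
  induction n using Nat.strong_induction_on with
  | _ n ih =>
    by_cases h2 : n < 2
    · have h1 : n = 1 := by omega
      subst h1
      rw [pvLsb_pos 1 (by omega), pvLsb_zero, pvPar_pos 1 (by omega), pvPar_zero,
        pvBdig_lt_two 1 (by omega)]
      constructor <;> decide
    · have hrec := ih (n / 2) (Nat.div_lt_self (by omega) (by omega)) (by omega)
      rw [pvLsb_pos n (by omega), pvBdig_ge_two n h2, pvPar_pos n (by omega)]
      have hcell : pvCell (Nat.digitChar (n % 2)) = (if n % 2 = 1 then ['*', '_'] else ['_', '*']) := by
        rcases Nat.mod_two_eq_zero_or_one n with h | h <;> rw [h] <;> decide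
      have hcnt : List.count '1' [Nat.digitChar (n % 2)] = n % 2 := by
        rcases Nat.mod_two_eq_zero_or_one n with h | h <;> rw [h] <;> decide
      constructor
      · simp [hrec.1, hcell]
      · rw [hrec.2, List.count_append, hcnt, pvXorMod]
        omega

-- ===== VERDICT (by name: the statement is the Claim_ definition above) =====
theorem encode_stage_barcode_pattern_py_spec : Claim_equal_encode_stage_barcode_pattern_py := by
  intro s _
  unfold Spec_encode_stage_barcode_pattern_py
  simp only [encode_stage_barcode_pattern_py, encode_stage_barcode_pattern_py_alt]
  have hval : (0 : Int) ≤ max 0 s := le_max_left _ _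
  set v : Nat := (max 0 s).toNat with hv
  have h0b : PySem.Int.toBinChars0b (max 0 s) = '0' :: 'b' :: Nat.toDigits 2 v := by
    unfold PySem.Int.toBinChars0b
    rw [if_neg (by omega)]
  rw [h0b, PySem.List.slice_from _ (show (0 : Int) ≤ 2 from by norm_num)]
  norm_num [pvToDigits_two]
  rw [pvBLoop_eq]
  by_cases hz : v = 0
  · rw [hz, pvLsb_zero, pvPar_zero, pvBdig_lt_two 0 (by omega)]
    decide
  · have hb := pvBridge v (Nat.pos_of_ne_zero hz)
    have hlsb_ne : pvLsb v ≠ [] := by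
      rw [pvLsb_pos v hz]; simp
    simp only [List.nil_append, Nat.zero_xor, if_neg hlsb_ne]
    have hp := pvPar_le_one v
    by_cases hpar : (pvBdig v).count '1' % 2 = 0
    · have hpv : pvPar v = 0 := by rw [hb.2, hpar]
      simp [hpv, hpar, hb.1]
    · have hpv : pvPar v = 1 := by rw [hb.2]; omega
      simp [hpv, hpar, hb.1]
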